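-- pv_equiv track=rewrite | github.com/grodrguez3/EUCLID-hyperelasticity-NN | my_drivers/helper_FEBIO.py | map_facets_to_elements
-- ===== SOURCE A (Python) =====
-- def map_facets_to_elements(connectivity, facets):
--     """
--     Parameters
--     ----------
--     connectivity : list of tuples
--         Each tuple is (elem_id, node1, node2, ..., nodeK).
--     facets : list of tuples
--         Each tuple is (facet_id, n1, n2, n3, n4).
--
--     Returns
--     -------
--     mapping : dict
--         {
--           facet_id: {
--             'facet_nodes':    [n1, n2, n3, n4],
--             'element_ids':    [e1, e2, …]    # all elements that contain these 4 nodes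
--           },
--           …
--         }
--         Only facets that are found in at least one element are included.
--     """
--     mapping = {}
--     for facet_entry in facets:
--         facet_id, *f_nodes = facet_entry
--         fset = set(f_nodes)
--
--         # find all elems whose node-set contains these 4 nodes
--         matches = []
--         for elem_entry in connectivity:
--             elem_id, *e_nodes = elem_entry
--             if fset.issubset(e_nodes):
--                 matches.append(elem_id)
--
--         if matches:
--             mapping[facet_id] = {
--                 'facet_nodes':   f_nodes,
--                 'element_ids':   matches
--             }
--
--     return mapping
-- ===== SOURCE B (Python) =====
-- def map_facets_to_elements(connectivity, facets):
--     # Inverted index: node -> ordered list of indices of elements containing it.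
--     index = {}
--     for i, elem_entry in enumerate(connectivity):
--         elem_id, *e_nodes = elem_entry
--         for n in set(e_nodes):
--             index.setdefault(n, []).append(i)
--
--     mapping = {}
--     for facet_entry in facets:
--         facet_id, *f_nodes = facet_entry
--         nodes = list(set(f_nodes))
--         if nodes:
--             common = index.get(nodes[0], [])
--             for n in nodes[1:]:
--                 s = set(index.get(n, ()))
--                 common = [i for i in common if i in s]
--         else:
--             common = range(len(connectivity))
--         matches = [connectivity[i][0] for i in common]
--         if matches:
--             mapping[facet_id] = {'facet_nodes': f_nodes,
--                                  'element_ids': matches}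
--     return mapping
-- ===== Notes on version B (the rewrite author's own statement) =====
-- stated objective: faster
-- what changed: Replaces A's per-facet scan of all elements by a node->element-indices inverted index built once; each facet intersects its nodes' posting lists, so the inner scan over connectivity disappears.
-- outside the precondition, e.g. on map_facets_to_elements([(), (1, 2)], []): A returns {}, B raises ValueError
import Mathlib
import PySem

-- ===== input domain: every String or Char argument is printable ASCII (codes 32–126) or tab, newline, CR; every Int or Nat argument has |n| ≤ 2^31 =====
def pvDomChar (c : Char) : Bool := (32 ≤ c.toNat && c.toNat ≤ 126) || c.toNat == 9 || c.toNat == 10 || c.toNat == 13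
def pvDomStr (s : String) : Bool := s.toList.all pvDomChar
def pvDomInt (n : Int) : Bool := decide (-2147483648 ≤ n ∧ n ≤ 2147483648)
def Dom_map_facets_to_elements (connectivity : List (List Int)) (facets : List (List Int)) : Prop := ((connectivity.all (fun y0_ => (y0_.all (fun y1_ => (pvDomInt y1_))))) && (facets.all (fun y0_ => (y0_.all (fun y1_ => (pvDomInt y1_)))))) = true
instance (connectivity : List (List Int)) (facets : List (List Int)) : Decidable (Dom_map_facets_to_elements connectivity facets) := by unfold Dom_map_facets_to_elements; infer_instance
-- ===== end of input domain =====

-- B replaces A's per-facet scan of every element by a node → element-indices inverted index built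
-- once, intersecting the facet nodes' posting lists (objective: faster, asymptotically).

-- ===== PORT A =====
-- inner loop of A: collect the ids of all elements whose node list contains every node of fset
def pvMatchesA (connectivity : List (List Int)) (fset : PySem.Set Int) : List Int :=
  connectivity.foldl (fun ms elem_entry =>
    match elem_entry with
    | [] => ms  -- Python raises ValueError unpacking an empty entry; excluded by Pre_
    | elem_id :: e_nodes =>
      if PySem.Set.issubset fset e_nodes then ms ++ [elem_id] else ms) []

def map_facets_to_elements (connectivity : List (List Int)) (facets : List (List Int)) : List (Int × List (String × List Int)) :=
  (facets.foldl (fun mapping facet_entry =>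
    match facet_entry with
    | [] => mapping  -- Python raises ValueError unpacking an empty entry; excluded by Pre_
    | facet_id :: f_nodes =>
      let fset := PySem.Set.ofList f_nodes
      let ms := pvMatchesA connectivity fset
      if ms ≠ [] then
        PySem.Dict.insert mapping facet_id [("facet_nodes", f_nodes), ("element_ids", ms)]
      else mapping) PySem.Dict.empty).items

-- ===== PORT B =====
-- node -> ordered list of indices of the elements containing that node
def pvIndexB (connectivity : List (List Int)) : PySem.Dict Int (List Int) :=
  (PySem.List.enumerate connectivity 0).foldl (fun index p =>
    (PySem.Set.ofList p.2.tail).foldl (fun index n => index.modify n [] (· ++ [p.1])) index)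
    PySem.Dict.empty

-- intersection of the facet nodes' posting lists (all of connectivity when the facet has no nodes)
def pvCommonB (connectivity : List (List Int)) (index : PySem.Dict Int (List Int))
    (nodes : PySem.Set Int) : List Int :=
  match nodes with
  | [] => PySem.List.pyRange 0 connectivity.length 1
  | n0 :: rest =>
    rest.foldl (fun common n => common.filter (fun i => (index.getD n []).contains i))
      (index.getD n0 [])

def map_facets_to_elements_alt (connectivity : List (List Int)) (facets : List (List Int)) : List (Int × List (String × List Int)) :=
  let index := pvIndexB connectivity
  (facets.foldl (fun mapping facet_entry =>
    match facet_entry with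
    | [] => mapping  -- Python raises ValueError unpacking an empty entry; excluded by Pre_
    | facet_id :: f_nodes =>
      let nodes := PySem.Set.ofList f_nodes
      let common := pvCommonB connectivity index nodes
      -- connectivity[i][0]: every i in common is a valid index of a nonempty entry
      let ms := common.map (fun i => (PySem.List.pyGetD connectivity i []).headD 0)
      if ms ≠ [] then
        PySem.Dict.insert mapping facet_id [("facet_nodes", f_nodes), ("element_ids", ms)]
      else mapping) PySem.Dict.empty).items

-- ===== PRECONDITION & SPEC =====
-- Pre_ excludes the malformed inputs with an empty entry in either list: 'id, *nodes = entry'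
-- raises ValueError on them in A (except that A returns {} without reading connectivity when
-- facets is empty, where B's eager index build still raises).
def Pre_map_facets_to_elements (connectivity : List (List Int)) (facets : List (List Int)) : Prop :=
  (∀ e ∈ connectivity, e ≠ []) ∧ (∀ f ∈ facets, f ≠ [])
instance (connectivity : List (List Int)) (facets : List (List Int)) : Decidable (Pre_map_facets_to_elements connectivity facets) := by unfold Pre_map_facets_to_elements; infer_instance

def pvWitness_map_facets_to_elements : List (List Int) × List (List Int) :=
  ([[1, 2, 3], [2, 3, 4]], [[10, 2, 3], [11, 5]])

def Spec_map_facets_to_elements (connectivity : List (List Int)) (facets : List (List Int)) (out : List (Int × List (String × List Int))) : Prop := out = map_facets_to_elements_alt connectivity facets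
instance (connectivity : List (List Int)) (facets : List (List Int)) (out : List (Int × List (String × List Int))) : Decidable (Spec_map_facets_to_elements connectivity facets out) := by unfold Spec_map_facets_to_elements; infer_instance

-- ===== CLAIM (what is proved, stated in full; the proofs are below) =====
def Claim_equal_map_facets_to_elements : Prop := ∀ (connectivity : List (List Int)) (facets : List (List Int)), Dom_map_facets_to_elements connectivity facets → Pre_map_facets_to_elements connectivity facets → Spec_map_facets_to_elements connectivity facets (map_facets_to_elements connectivity facets)

-- ===== LEMMAS AND PROOFS =====
theorem pv_fold_modify_getD (S : List Int) (hS : S.Nodup) (d : PySem.Dict Int (List Int))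
    (i n : Int) :
    (S.foldl (fun d x => d.modify x [] (· ++ [i])) d).getD n []
      = d.getD n [] ++ (if n ∈ S then [i] else []) := by
  induction S generalizing d with
  | nil => simp
  | cons x t ih =>
    simp only [List.foldl_cons]
    rw [ih (List.Nodup.of_cons hS)]
    by_cases hx : n = x
    · subst hx
      have hnt : n ∉ t := (List.nodup_cons.mp hS).1
      simp [PySem.Dict.getD_modify_self, hnt]
    · simp [PySem.Dict.getD_modify, hx, List.mem_cons]

theorem pv_index_getD (zs : List (Int × List Int)) (d : PySem.Dict Int (List Int)) (n : Int) :
    (zs.foldl (fun d p =>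
        (PySem.Set.ofList p.2.tail).foldl (fun d x => d.modify x [] (· ++ [p.1])) d) d).getD n []
      = d.getD n [] ++ (zs.filter (fun p => p.2.tail.contains n)).map (·.1) := by
  induction zs generalizing d with
  | nil => simp
  | cons p t ih =>
    simp only [List.foldl_cons]
    rw [ih]
    rw [pv_fold_modify_getD _ (PySem.Set.nodup_ofList _) _ p.1 n]
    by_cases hn : n ∈ p.2.tail
    · simp [PySem.Set.mem_ofList, hn]
    · simp [PySem.Set.mem_ofList, hn]

theorem pv_enum_fst_inj (conn : List (List Int)) {p q : Int × List Int}
    (hp : p ∈ PySem.List.enumerate conn 0) (hq : q ∈ PySem.List.enumerate conn 0)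
    (h : p.1 = q.1) : p = q := by
  rw [PySem.List.mem_enumerate_iff] at hp hq
  obtain ⟨k, hk, rfl⟩ := hp
  obtain ⟨k', hk', rfl⟩ := hq
  simp only [zero_add] at h
  have : k = k' := by exact_mod_cast h
  subst this; rfl

theorem pv_filter_posting (connectivity : List (List Int)) (q r : Int × List Int → Bool) :
    ((((PySem.List.enumerate connectivity 0).filter q).map (·.1)).filter
        (fun i => (((PySem.List.enumerate connectivity 0).filter r).map (·.1)).contains i))
      = ((PySem.List.enumerate connectivity 0).filter (fun p => q p && r p)).map (·.1) := by
  rw [List.filter_map, List.filter_filter]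
  apply congrArg (List.map _)
  apply List.filter_congr
  intro p hp
  have hkey : (((PySem.List.enumerate connectivity 0).filter r).map (·.1)).contains p.1 = r p := by
    rw [List.contains_eq_mem]
    cases hr : r p with
    | true =>
      rw [decide_eq_true_eq]
      exact List.mem_map.mpr ⟨p, List.mem_filter.mpr ⟨hp, hr⟩, rfl⟩
    | false =>
      rw [decide_eq_false_iff_not]
      intro hmem
      obtain ⟨p', hp', hfst⟩ := List.mem_map.mp hmem
      have := List.mem_filter.mp hp'
      have hpe : p' = p := pv_enum_fst_inj connectivity this.1 hp hfst
      rw [hpe] at this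
      simp [hr] at this
  simp only [Function.comp_apply, hkey]
  rw [Bool.and_comm]

theorem pvIndexB_getD (connectivity : List (List Int)) (n : Int) :
    (pvIndexB connectivity).getD n []
      = ((PySem.List.enumerate connectivity 0).filter (fun p => p.2.tail.contains n)).map (·.1) := by
  unfold pvIndexB
  rw [pv_index_getD]
  simp

theorem pv_fold_filter_common (connectivity : List (List Int)) (rest : List Int)
    (q : Int × List Int → Bool) :
    rest.foldl (fun common n =>
        common.filter (fun i => ((pvIndexB connectivity).getD n []).contains i))
      (((PySem.List.enumerate connectivity 0).filter q).map (·.1))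
      = ((PySem.List.enumerate connectivity 0).filter
          (fun p => q p && rest.all (fun n => p.2.tail.contains n))).map (·.1) := by
  induction rest generalizing q with
  | nil => simp
  | cons m t ih =>
    simp only [List.foldl_cons]
    rw [show (fun i => ((pvIndexB connectivity).getD m []).contains i)
          = (fun i => ((((PySem.List.enumerate connectivity 0).filter
              (fun p => p.2.tail.contains m)).map (·.1))).contains i) by
        funext i; rw [pvIndexB_getD]]
    rw [pv_filter_posting]
    rw [ih]
    apply congrArg (List.map _)
    apply List.filter_congr
    intro p _
    simp [Bool.and_assoc]

theorem pv_all_ofList (l : List Int) (g : Int → Bool) :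
    (PySem.Set.ofList l).all g = l.all g := by
  rw [Bool.eq_iff_iff]
  simp only [List.all_eq_true, PySem.Set.mem_ofList]

theorem pv_common_eq (connectivity : List (List Int)) (f_nodes : List Int) :
    pvCommonB connectivity (pvIndexB connectivity) (PySem.Set.ofList f_nodes)
      = ((PySem.List.enumerate connectivity 0).filter
          (fun p => f_nodes.all (fun n => p.2.tail.contains n))).map (·.1) := by
  have hall : ∀ (g : Int → Bool), (PySem.Set.ofList f_nodes).all g = f_nodes.all g :=
    fun g => pv_all_ofList f_nodes g
  cases h : PySem.Set.ofList f_nodes with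
  | nil =>
    have hf : f_nodes = [] := by
      cases f_nodes with
      | nil => rfl
      | cons a t =>
        have ha : a ∈ PySem.Set.ofList (a :: t) := by rw [PySem.Set.mem_ofList]; simp
        rw [h] at ha
        simp at ha
    subst hf
    simp [pvCommonB, PySem.List.map_fst_enumerate]
  | cons n0 rest =>
    show rest.foldl _ ((pvIndexB connectivity).getD n0 []) = _
    rw [pvIndexB_getD]
    rw [pv_fold_filter_common]
    apply congrArg (List.map _)
    apply List.filter_congr
    intro p _
    rw [← List.all_cons, ← h, hall]

theorem pv_issubset (f t : List Int) :
    PySem.Set.issubset (PySem.Set.ofList f) t = f.all (fun n => t.contains n) := by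
  rw [Bool.eq_iff_iff]
  simp only [PySem.Set.issubset_iff, List.all_eq_true, PySem.Set.mem_ofList,
    List.contains_eq_mem, decide_eq_true_eq]

theorem pv_matches_eq (connectivity : List (List Int)) (h : ∀ e ∈ connectivity, e ≠ [])
    (f_nodes : List Int) :
    pvMatchesA connectivity (PySem.Set.ofList f_nodes)
      = (pvCommonB connectivity (pvIndexB connectivity) (PySem.Set.ofList f_nodes)).map
          (fun i => (PySem.List.pyGetD connectivity i []).headD 0) := by
  -- A side: turn the loop into filter-then-map over connectivity
  have hA : pvMatchesA connectivity (PySem.Set.ofList f_nodes)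
      = (connectivity.filter
            (fun e => PySem.Set.issubset (PySem.Set.ofList f_nodes) e.tail)).map
          (fun e => e.headD 0) := by
    unfold pvMatchesA
    rw [PySem.List.foldl_congr_mem
      (g := fun ms e =>
        if PySem.Set.issubset (PySem.Set.ofList f_nodes) e.tail then ms ++ [e.headD 0] else ms)]
    · rw [PySem.List.foldl_append_if]
      simp
    · intro ms e he
      cases e with
      | nil => exact absurd rfl (h [] he)
      | cons a t => rfl
  rw [hA, pv_common_eq]
  conv_lhs => rw [← PySem.List.map_snd_enumerate connectivity 0]
  rw [List.filter_map, List.map_map, List.map_map]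
  rw [show ((fun e => PySem.Set.issubset (PySem.Set.ofList f_nodes) e.tail) ∘
        (fun x : Int × List Int => x.2))
      = (fun p : Int × List Int => f_nodes.all (fun n => p.2.tail.contains n)) from
    funext fun p => pv_issubset f_nodes p.2.tail]
  apply List.map_congr_left
  intro p hp
  have hp' := (List.mem_filter.mp hp).1
  rw [PySem.List.mem_enumerate_iff] at hp'
  obtain ⟨k, hk, rfl⟩ := hp'
  simp only [Function.comp_apply, zero_add]
  rw [PySem.List.pyGetD_natCast]
  simp [List.getD_eq_getElem?_getD, hk]

-- ===== VERDICT (by name: the statement is the Claim_ definition above) =====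
theorem map_facets_to_elements_spec : Claim_equal_map_facets_to_elements := by
  intro connectivity facets _hDom hPre
  unfold Spec_map_facets_to_elements map_facets_to_elements map_facets_to_elements_alt
  congr 1
  apply PySem.List.foldl_congr_mem
  intro mapping fe _hfe
  match fe with
  | [] => rfl
  | fid :: fn => simp only [pv_matches_eq connectivity hPre.1 fn]
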